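-- pv_equiv track=rewrite | github.com/General-Lindor/LibraryCollection | Python/Datum/Datum.py | maxOfDatums
-- ===== SOURCE A (Python) =====
-- def maxOfDatums(datumListe):
--     if not isinstance(datumListe,list):
--         return None
--     if len(datumListe) == 0:
--         return None
--     result = datumListe[0]
--     for element in datumListe:
--         if result[0] < element[0]:
--             result = element
--         elif result[0] == element[0]:
--             if result[1] < element[1]:
--                 result = element
--             elif result[1] == element[1]:
--                 if result[2] < element[2]:
--                     result = element
--     return result
-- ===== SOURCE B (Python) =====
-- def maxOfDatums(datumListe):
--     if not isinstance(datumListe, list):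
--         return None
--     if len(datumListe) == 0:
--         return None
--     return sorted(datumListe, key=lambda e: (e[0], e[1], e[2]), reverse=True)[0]
-- ===== Notes on version B (the rewrite author's own statement) =====
-- stated objective: simpler
-- what changed: B replaces A's forward scan with nested component comparisons by one stable descending sort on the key (e[0],e[1],e[2]) and returns its first element; stability of reverse=True makes this the first maximal element, matching A.
import Mathlib
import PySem

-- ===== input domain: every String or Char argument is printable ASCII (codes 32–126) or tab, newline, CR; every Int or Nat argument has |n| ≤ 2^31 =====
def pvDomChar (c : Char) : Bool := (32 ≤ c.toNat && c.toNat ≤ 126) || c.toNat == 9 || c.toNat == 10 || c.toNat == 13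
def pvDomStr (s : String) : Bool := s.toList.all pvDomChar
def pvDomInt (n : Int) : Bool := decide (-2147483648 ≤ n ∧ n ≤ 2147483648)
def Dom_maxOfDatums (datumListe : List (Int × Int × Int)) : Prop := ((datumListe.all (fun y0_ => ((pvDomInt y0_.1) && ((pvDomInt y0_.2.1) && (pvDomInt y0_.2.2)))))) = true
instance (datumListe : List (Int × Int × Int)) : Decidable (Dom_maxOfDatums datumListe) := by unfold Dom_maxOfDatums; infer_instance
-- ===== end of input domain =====

-- B replaces A's forward scan with nested comparisons by one stable descending sort
-- on the key (e[0],e[1],e[2]) and returns its first element (objective: simpler).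

-- ===== PORT A =====
def maxOfDatums (datumListe : List (Int × Int × Int)) : Option (Int × Int × Int) :=
  match datumListe with
  | [] => none
  | x :: _ =>
    some (datumListe.foldl (fun result element =>
      if result.1 < element.1 then element
      else if result.1 = element.1 then
        if result.2.1 < element.2.1 then element
        else if result.2.1 = element.2.1 then
          if result.2.2 < element.2.2 then element
          else result
        else result
      else result) x)

-- ===== PORT B =====
-- Python's tuple key (e[0], e[1], e[2]) compares lexicographically: Lex product of Ints
def pvKey3 (e : Int × Int × Int) : Int ×ₗ (Int ×ₗ Int) := toLex (e.1, toLex (e.2.1, e.2.2))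

-- sorted(datumListe, key=…, reverse=True)[0]; the [0] is total here since the sorted
-- list is a permutation of the nonempty input, hence head? on the matched cons.
def maxOfDatums_alt (datumListe : List (Int × Int × Int)) : Option (Int × Int × Int) :=
  match datumListe with
  | [] => none
  | _ :: _ => (PySem.List.sorted datumListe pvKey3 true).head?

-- ===== PRECONDITION & SPEC =====
def Spec_maxOfDatums (datumListe : List (Int × Int × Int)) (out : Option (Int × Int × Int)) : Prop := out = maxOfDatums_alt datumListe
instance (datumListe : List (Int × Int × Int)) (out : Option (Int × Int × Int)) : Decidable (Spec_maxOfDatums datumListe out) := by unfold Spec_maxOfDatums; infer_instance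

-- ===== CLAIM (what is proved, stated in full; the proofs are below) =====
def Claim_equal_maxOfDatums : Prop := ∀ (datumListe : List (Int × Int × Int)), Dom_maxOfDatums datumListe → Spec_maxOfDatums datumListe (maxOfDatums datumListe)

-- ===== LEMMAS AND PROOFS =====

-- A's update step, named
def stepA (result element : Int × Int × Int) : Int × Int × Int :=
  if result.1 < element.1 then element
  else if result.1 = element.1 then
    if result.2.1 < element.2.1 then element
    else if result.2.1 = element.2.1 then
      if result.2.2 < element.2.2 then element
      else result
    else result
  else result

theorem key3_lt_iff (a b : Int × Int × Int) :
    pvKey3 a < pvKey3 b ↔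
      (a.1 < b.1 ∨ (a.1 = b.1 ∧ (a.2.1 < b.2.1 ∨ (a.2.1 = b.2.1 ∧ a.2.2 < b.2.2)))) := by
  simp [pvKey3, Prod.Lex.lt_iff]

theorem stepA_eq_key3 (r e : Int × Int × Int) :
    stepA r e = if pvKey3 r < pvKey3 e then e else r := by
  simp only [stepA]
  by_cases h : pvKey3 r < pvKey3 e
  · rw [if_pos h, key3_lt_iff] at *
    split_ifs <;> first | rfl | omega
  · rw [if_neg h]; rw [key3_lt_iff] at h
    split_ifs <;> first | rfl | omega

-- head of a reverse-key insertion: exactly A's update step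
theorem head?_insertBy_rev (x h : Int × Int × Int) (t : List (Int × Int × Int)) :
    (PySem.List.insertBy (fun a b => decide (pvKey3 b < pvKey3 a)) x (h :: t)).head?
      = some (stepA h x) := by
  rw [stepA_eq_key3, PySem.List.insertBy]
  by_cases hc : pvKey3 h < pvKey3 x <;> simp [hc]

-- the head of the insertion-sort accumulator is A's running maximum
theorem head?_foldl_insertBy (ys : List (Int × Int × Int)) :
    ∀ (r : Int × Int × Int) (acc : List (Int × Int × Int)), acc.head? = some r →
    (ys.foldl (fun acc x => PySem.List.insertBy (fun a b => decide (pvKey3 b < pvKey3 a)) x acc) acc).head?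
      = some (ys.foldl stepA r) := by
  induction ys with
  | nil => intro r acc h; simpa using h
  | cons y ys ih =>
    intro r acc h
    cases acc with
    | nil => simp at h
    | cons a t =>
      simp only [List.head?_cons, Option.some.injEq] at h
      subst h
      rw [List.foldl_cons, List.foldl_cons]
      exact ih (stepA a y) _ (head?_insertBy_rev y a t)

theorem stepA_self (x : Int × Int × Int) : stepA x x = x := by
  simp [stepA]

-- ===== VERDICT (by name: the statement is the Claim_ definition above) =====
theorem maxOfDatums_spec : Claim_equal_maxOfDatums := by
  intro l _
  unfold Spec_maxOfDatums
  cases l with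
  | nil => rfl
  | cons x xs =>
    show some ((x :: xs).foldl stepA x) = maxOfDatums_alt (x :: xs)
    simp only [maxOfDatums_alt, PySem.List.sorted_rev_eq_foldl_insertBy, List.foldl_cons,
      stepA_self]
    rw [show PySem.List.insertBy (fun a b => decide (pvKey3 b < pvKey3 a)) x [] = [x] from rfl]
    exact (head?_foldl_insertBy xs x [x] rfl).symm
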